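-- pv_equiv track=rewrite | github.com/martingiguere/hakko-203-firmware-video | firmware_review_tool/precompute_gaps.py | group_into_gaps
-- ===== SOURCE A (Python) =====
-- def group_into_gaps(missing_addrs):
--     """Group contiguous missing addresses into gaps."""
--     if not missing_addrs:
--         return []
--     gaps = []
--     gap_start = missing_addrs[0]
--     gap_addrs = [missing_addrs[0]]
--     for i in range(1, len(missing_addrs)):
--         if missing_addrs[i] == missing_addrs[i - 1] + 0x10:
--             gap_addrs.append(missing_addrs[i])
--         else:
--             gaps.append((gap_start, gap_addrs[-1], list(gap_addrs)))
--             gap_start = missing_addrs[i]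
--             gap_addrs = [missing_addrs[i]]
--     gaps.append((gap_start, gap_addrs[-1], list(gap_addrs)))
--     return gaps
-- ===== SOURCE B (Python) =====
-- def group_into_gaps(missing_addrs):
--     """Group contiguous missing addresses into gaps.
--
--     Key trick: addr - 0x10*index is constant exactly across a contiguous run,
--     so the run boundaries are the indices where that key changes; the result
--     is read off by slicing the input at those cut points."""
--     if not missing_addrs:
--         return []
--     n = len(missing_addrs)
--     keys = [a - 0x10 * i for i, a in enumerate(missing_addrs)]
--     bounds = [0] + [i for i in range(1, n) if keys[i] != keys[i - 1]] + [n]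
--     return [(missing_addrs[s], missing_addrs[e - 1], missing_addrs[s:e])
--             for s, e in zip(bounds, bounds[1:])]
-- ===== Notes on version B (the rewrite author's own statement) =====
-- stated objective: alternative
-- what changed: B uses the subtract-the-index key trick (addr - 0x10*i is constant on a contiguous run): it computes the key list, collects the cut indices where the key changes, and reads each gap off by slicing the input between consecutive cut points, instead of A's stateful scan threading gap_start/gap_addrs with a trailing flush.
import Mathlib
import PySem

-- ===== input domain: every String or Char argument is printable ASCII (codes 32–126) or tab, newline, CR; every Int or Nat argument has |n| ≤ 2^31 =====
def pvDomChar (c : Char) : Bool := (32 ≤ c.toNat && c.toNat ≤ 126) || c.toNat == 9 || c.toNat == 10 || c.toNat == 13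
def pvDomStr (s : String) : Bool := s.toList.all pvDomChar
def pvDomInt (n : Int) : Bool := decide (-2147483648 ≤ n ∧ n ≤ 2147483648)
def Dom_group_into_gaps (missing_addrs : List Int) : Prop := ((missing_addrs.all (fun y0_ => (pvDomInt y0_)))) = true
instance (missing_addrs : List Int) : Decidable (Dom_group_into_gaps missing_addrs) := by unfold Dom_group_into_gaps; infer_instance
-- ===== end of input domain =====

-- B replaces A's stateful single loop (gap_start/gap_addrs threaded through the scan, with a
-- duplicated trailing flush) by the subtract-the-index key trick: addr - 0x10*i is constant
-- exactly on a contiguous run, so B computes the cut indices where that key changes and reads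
-- the gaps off by slicing; same linear cost, a different algorithm.

-- ===== PORT A =====
def group_into_gaps (missing_addrs : List Int) : List (Int × Int × List Int) :=
  if missing_addrs.isEmpty then [] else
    let init : List (Int × Int × List Int) × Int × List Int :=
      ([], PySem.List.pyGetD missing_addrs 0 0, [PySem.List.pyGetD missing_addrs 0 0])
    let st := (PySem.List.pyRange 1 (missing_addrs.length : Int) 1).foldl
      (fun st i =>
        if PySem.List.pyGetD missing_addrs i 0 = PySem.List.pyGetD missing_addrs (i - 1) 0 + 0x10 then
          (st.1, st.2.1, st.2.2 ++ [PySem.List.pyGetD missing_addrs i 0])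
        else
          (st.1 ++ [(st.2.1, PySem.List.pyGetD st.2.2 (-1) 0, st.2.2)],
           PySem.List.pyGetD missing_addrs i 0, [PySem.List.pyGetD missing_addrs i 0]))
      init
    st.1 ++ [(st.2.1, PySem.List.pyGetD st.2.2 (-1) 0, st.2.2)]

-- ===== PORT B =====
def group_into_gaps_alt (missing_addrs : List Int) : List (Int × Int × List Int) :=
  if missing_addrs.isEmpty then [] else
    let n : Int := (missing_addrs.length : Int)
    let keys : List Int := (PySem.List.enumerate missing_addrs 0).map (fun p => p.2 - 0x10 * p.1)
    let bounds : List Int :=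
      [0] ++ (PySem.List.pyRange 1 n 1).filter
        (fun i => decide (PySem.List.pyGetD keys i 0 ≠ PySem.List.pyGetD keys (i - 1) 0)) ++ [n]
    (bounds.zip bounds.tail).map (fun se =>
      (PySem.List.pyGetD missing_addrs se.1 0, PySem.List.pyGetD missing_addrs (se.2 - 1) 0,
       PySem.List.slice missing_addrs (some se.1) (some se.2)))

-- ===== PRECONDITION & SPEC =====
def Spec_group_into_gaps (missing_addrs : List Int) (out : List (Int × Int × List Int)) : Prop := out = group_into_gaps_alt missing_addrs
instance (missing_addrs : List Int) (out : List (Int × Int × List Int)) : Decidable (Spec_group_into_gaps missing_addrs out) := by unfold Spec_group_into_gaps; infer_instance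

-- ===== CLAIM (what is proved, stated in full; the proofs are below) =====
def Claim_equal_group_into_gaps : Prop := ∀ (missing_addrs : List Int), Dom_group_into_gaps missing_addrs → Spec_group_into_gaps missing_addrs (group_into_gaps missing_addrs)

-- ===== LEMMAS AND PROOFS =====

-- reference decomposition: split off the contiguous continuation of `prev`
def pvTakeRun : Int → List Int → List Int × List Int
  | _, [] => ([], [])
  | prev, x :: xs =>
    if x = prev + 0x10 then
      ((x :: (pvTakeRun x xs).1), (pvTakeRun x xs).2)
    else ([], x :: xs)

lemma pvTakeRun_rest_length (prev : Int) (xs : List Int) :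
    (pvTakeRun prev xs).2.length ≤ xs.length := by
  induction xs generalizing prev with
  | nil => simp [pvTakeRun]
  | cons x t ih =>
    simp only [pvTakeRun]
    split
    · exact Nat.le_succ_of_le (ih x)
    · simp

-- reference: the maximal contiguous runs of a list
def pvRunsOf : List Int → List (List Int)
  | [] => []
  | a :: t => (a :: (pvTakeRun a t).1) :: pvRunsOf (pvTakeRun a t).2
termination_by xs => xs.length
decreasing_by
  exact Nat.lt_succ_of_le (pvTakeRun_rest_length a t)

def pvFmt (r : List Int) : Int × Int × List Int :=
  (PySem.List.pyGetD r 0 0, PySem.List.pyGetD r (-1) 0, r)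

-- ---------- A-side: A's fold produces the formatted runs ----------

-- A's loop body, rephrased on the pair (previous element, current element)
def pvStepA (st : List (Int × Int × List Int) × Int × List Int) (pc : Int × Int) :
    List (Int × Int × List Int) × Int × List Int :=
  if pc.2 = pc.1 + 0x10 then
    (st.1, st.2.1, st.2.2 ++ [pc.2])
  else
    (st.1 ++ [(st.2.1, PySem.List.pyGetD st.2.2 (-1) 0, st.2.2)], pc.2, [pc.2])

-- the index range 1..n-1 of A, mapped through the double lookup, is the list of adjacent pairs
lemma idx_to_pairs (xs : List Int) :
    (PySem.List.pyRange 1 (xs.length : Int) 1).map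
        (fun i => (PySem.List.pyGetD xs (i - 1) 0, PySem.List.pyGetD xs i 0))
      = xs.zip xs.tail := by
  apply List.ext_getElem
  · simp [PySem.List.length_pyRange_one]
  · intro k hk1 hk2
    have hkr : k < (PySem.List.pyRange 1 (xs.length : Int) 1).length := by
      simpa using hk1
    have hklen : k + 1 < xs.length := by
      simp [PySem.List.length_pyRange_one] at hkr
      omega
    have hk0 : k < xs.length := by omega
    simp only [List.getElem_map]
    rw [PySem.List.getElem_pyRange_one 1 (xs.length : Int) k hkr]
    have h1 : (1 : Int) + (k : Int) - 1 = ((k : Nat) : Int) := by omega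
    have h2 : (1 : Int) + (k : Int) = (((k + 1 : Nat)) : Int) := by push_cast; omega
    rw [h1, h2, PySem.List.pyGetD_natCast, PySem.List.pyGetD_natCast]
    simp [List.getElem_zip, List.getElem_tail, hk0, hklen]

-- A's pair fold followed by the trailing flush produces the formatted runs
lemma pvStepA_foldl (t : List Int) (prev : Int) (g : List (Int × Int × List Int))
    (s : Int) (ads : List Int) :
    (let st := List.foldl pvStepA (g, s, ads) ((prev :: t).zip t)
     st.1 ++ [(st.2.1, PySem.List.pyGetD st.2.2 (-1) 0, st.2.2)])
      = g ++ (s, PySem.List.pyGetD (ads ++ (pvTakeRun prev t).1) (-1) 0,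
              ads ++ (pvTakeRun prev t).1)
          :: (pvRunsOf (pvTakeRun prev t).2).map pvFmt := by
  induction t generalizing prev g s ads with
  | nil => simp [pvTakeRun, pvRunsOf]
  | cons x t' ih =>
    simp only [List.zip_cons_cons, List.foldl_cons]
    by_cases hx : x = prev + 0x10
    · have hstep : pvStepA (g, s, ads) (prev, x) = (g, s, ads ++ [x]) := by
        simp [pvStepA, hx]
      rw [hstep]
      have := ih x g s (ads ++ [x])
      simp only [] at this ⊢
      rw [this]
      simp only [pvTakeRun, if_pos hx]
      simp [List.append_assoc]
    · have hstep : pvStepA (g, s, ads) (prev, x) =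
          (g ++ [(s, PySem.List.pyGetD ads (-1) 0, ads)], x, [x]) := by
        simp [pvStepA, hx]
      rw [hstep]
      have := ih x (g ++ [(s, PySem.List.pyGetD ads (-1) 0, ads)]) x [x]
      simp only [] at this ⊢
      rw [this]
      simp only [pvTakeRun, if_neg hx]
      rw [pvRunsOf]
      simp [pvFmt, PySem.List.pyGetD_zero_cons]

lemma a_eq_runs (xs : List Int) :
    group_into_gaps xs = (pvRunsOf xs).map pvFmt := by
  cases xs with
  | nil => simp [group_into_gaps, pvRunsOf]
  | cons a t =>
    unfold group_into_gaps
    simp only [List.isEmpty_cons, Bool.false_eq_true, if_false]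
    have hbody :
        ((PySem.List.pyRange 1 ((a :: t).length : Int) 1).foldl
          (fun st i =>
            if PySem.List.pyGetD (a :: t) i 0 = PySem.List.pyGetD (a :: t) (i - 1) 0 + 0x10 then
              (st.1, st.2.1, st.2.2 ++ [PySem.List.pyGetD (a :: t) i 0])
            else
              (st.1 ++ [(st.2.1, PySem.List.pyGetD st.2.2 (-1) 0, st.2.2)],
               PySem.List.pyGetD (a :: t) i 0, [PySem.List.pyGetD (a :: t) i 0]))
          ([], PySem.List.pyGetD (a :: t) 0 0, [PySem.List.pyGetD (a :: t) 0 0]))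
        = List.foldl pvStepA ([], PySem.List.pyGetD (a :: t) 0 0,
            [PySem.List.pyGetD (a :: t) 0 0]) ((a :: t).zip (a :: t).tail) := by
      rw [← idx_to_pairs (a :: t), List.foldl_map]
      rfl
    simp only [hbody]
    have hzip : (a :: t).zip (a :: t).tail = (a :: t).zip t := by simp
    have hga : PySem.List.pyGetD (a :: t) 0 0 = a := PySem.List.pyGetD_zero_cons a t 0
    rw [hzip, hga]
    have := pvStepA_foldl t a [] a [a]
    simp only [] at this ⊢
    rw [this]
    rw [pvRunsOf]
    simp [pvFmt, PySem.List.pyGetD_zero_cons]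

-- ---------- B-side: cut indices and slicing produce the formatted runs ----------

-- the direct cut condition: index i starts a new run
def pvCut (xs : List Int) (i : Int) : Bool :=
  decide (PySem.List.pyGetD xs i 0 ≠ PySem.List.pyGetD xs (i - 1) 0 + 0x10)

def pvBounds (xs : List Int) : List Int :=
  [0] ++ (PySem.List.pyRange 1 (xs.length : Int) 1).filter (pvCut xs) ++ [(xs.length : Int)]

def pvG (xs : List Int) (bounds : List Int) : List (Int × Int × List Int) :=
  (bounds.zip bounds.tail).map (fun se =>
    (PySem.List.pyGetD xs se.1 0, PySem.List.pyGetD xs (se.2 - 1) 0,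
     PySem.List.slice xs (some se.1) (some se.2)))

lemma enum_getElem {α : Type} (xs : List α) (s : Int) (k : Nat)
    (hk : k < xs.length) (h : k < (PySem.List.enumerate xs s).length) :
    (PySem.List.enumerate xs s)[k] = (s + k, xs[k]) := by
  induction xs generalizing s k with
  | nil => simp at hk
  | cons x t ih =>
    simp only [PySem.List.enumerate_cons]
    cases k with
    | zero => simp
    | succ m =>
      have hm : m < t.length := by simpa using hk
      have hm' : m < (PySem.List.enumerate t (s + 1)).length := by
        simpa [PySem.List.length_enumerate] using hm
      simp only [List.getElem_cons_succ]
      rw [ih (s + 1) m hm hm']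
      congr 1
      push_cast
      ring

-- the key lookup: keys[k] = xs[k] - 16*k
lemma keys_get (xs : List Int) (k : Nat) (hk : k < xs.length) :
    PySem.List.pyGetD ((PySem.List.enumerate xs 0).map (fun p => p.2 - 0x10 * p.1)) (k : Int) 0
      = PySem.List.pyGetD xs (k : Int) 0 - 0x10 * k := by
  have hk1 : k < ((PySem.List.enumerate xs 0).map (fun p => p.2 - 0x10 * p.1)).length := by
    simp [PySem.List.length_enumerate, hk]
  have hk2 : k < (PySem.List.enumerate xs 0).length := by
    simpa [PySem.List.length_enumerate] using hk
  rw [PySem.List.pyGetD_natCast, PySem.List.pyGetD_natCast]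
  rw [List.getD_eq_getElem _ _ hk1, List.getD_eq_getElem _ _ hk]
  simp only [List.getElem_map]
  rw [enum_getElem xs 0 k hk hk2]
  simp

-- B's filter over key inequalities is the filter over the direct cut condition
lemma alt_eq_G (xs : List Int) (hne : ¬ xs.isEmpty) :
    group_into_gaps_alt xs = pvG xs (pvBounds xs) := by
  unfold group_into_gaps_alt pvG pvBounds
  rw [if_neg (by simpa using hne)]
  dsimp only []
  have hfilt :
      List.filter
        (fun i => decide (PySem.List.pyGetD
            ((PySem.List.enumerate xs 0).map (fun p => p.2 - 0x10 * p.1)) i 0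
          ≠ PySem.List.pyGetD
            ((PySem.List.enumerate xs 0).map (fun p => p.2 - 0x10 * p.1)) (i - 1) 0))
        (PySem.List.pyRange 1 (xs.length : Int) 1)
      = List.filter (pvCut xs) (PySem.List.pyRange 1 (xs.length : Int) 1) := by
    apply List.filter_congr
    intro i hi
    rw [PySem.List.mem_pyRange_one] at hi
    obtain ⟨hi1, hi2⟩ := hi
    have hk : i = ((i.toNat : Nat) : Int) := by omega
    have hkn : i.toNat < xs.length := by omega
    have hk1 : i.toNat - 1 < xs.length := by omega
    unfold pvCut
    rw [hk]
    have hsub : ((i.toNat : Nat) : Int) - 1 = (((i.toNat - 1 : Nat)) : Int) := by omega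
    rw [hsub, keys_get xs i.toNat hkn, keys_get xs (i.toNat - 1) hk1, ← hsub]
    rw [decide_eq_decide]
    omega
  rw [hfilt]

-- the run split covers the list
lemma pvTakeRun_decomp (prev : Int) (t : List Int) :
    t = (pvTakeRun prev t).1 ++ (pvTakeRun prev t).2 := by
  induction t generalizing prev with
  | nil => simp [pvTakeRun]
  | cons x t' ih =>
    simp only [pvTakeRun]
    split
    · simpa using ih x
    · simp

-- inside the run, addresses are contiguous
lemma pvTakeRun_chain (t : List Int) (prev : Int) (k : Nat)
    (hk : k + 1 < (prev :: (pvTakeRun prev t).1).length) :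
    (prev :: (pvTakeRun prev t).1)[k + 1] = (prev :: (pvTakeRun prev t).1)[k]'(by omega) + 0x10 := by
  induction t generalizing prev k with
  | nil => simp [pvTakeRun] at hk
  | cons x t' ih =>
    by_cases hx : x = prev + 0x10
    · simp only [pvTakeRun, if_pos hx] at hk ⊢
      cases k with
      | zero => simpa using hx
      | succ m =>
        have := ih x m (by simpa using hk)
        simpa using this
    · simp [pvTakeRun, if_neg hx] at hk

-- the element after the run breaks contiguity
lemma pvTakeRun_break (t : List Int) (prev : Int) (y : Int) (ys : List Int)
    (hrest : (pvTakeRun prev t).2 = y :: ys) :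
    y ≠ (prev :: (pvTakeRun prev t).1).getLast (by simp) + 0x10 := by
  induction t generalizing prev with
  | nil => simp [pvTakeRun] at hrest
  | cons x t' ih =>
    by_cases hx : x = prev + 0x10
    · simp only [pvTakeRun, if_pos hx] at hrest ⊢
      have := ih x hrest
      simpa [List.getLast_cons] using this
    · simp only [pvTakeRun, if_neg hx] at hrest ⊢
      obtain ⟨rfl, rfl⟩ : x = y ∧ t' = ys := by
        constructor <;> [exact (List.cons.injEq ..).mp hrest |>.1;
                         exact (List.cons.injEq ..).mp hrest |>.2]
      simpa using hx

-- lookup in the right part of an append, Int offset form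
lemma pyGetD_append_right (u v : List Int) (b : Int) (hb : 0 ≤ b) (d : Int) :
    PySem.List.pyGetD (u ++ v) ((u.length : Int) + b) d = PySem.List.pyGetD v b d := by
  have hb' : (u.length : Int) + b = (((u.length + b.toNat : Nat)) : Int) := by omega
  have hbn : b = ((b.toNat : Nat) : Int) := by omega
  rw [hb', hbn, PySem.List.pyGetD_natCast, PySem.List.pyGetD_natCast]
  simp [List.getD, List.getElem?_append_right, max_eq_left hb]

-- slice in the right part of an append, Int offset form
lemma slice_append_right (u v : List Int) (p q : Int) (hp : 0 ≤ p) (hq : 0 ≤ q) :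
    PySem.List.slice (u ++ v) (some ((u.length : Int) + p)) (some ((u.length : Int) + q))
      = PySem.List.slice v (some p) (some q) := by
  rw [PySem.List.slice_toNat (ha := by positivity) (hb := by positivity),
      PySem.List.slice_toNat (ha := hp) (hb := hq)]
  have h1 : ((u.length : Int) + p).toNat = u.length + p.toNat := by omega
  have h2 : ((u.length : Int) + q).toNat = u.length + q.toNat := by omega
  rw [h1, h2]
  congr 1
  · omega
  · rw [List.drop_append]
    simp

-- shifting every bound by the length of a prefix shifts the grouping into the suffix
lemma pvG_shift (u v : List Int) (bs : List Int)
    (h0 : ∀ b ∈ bs, 0 ≤ b) (h1 : ∀ b ∈ bs.tail, 1 ≤ b) :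
    pvG (u ++ v) (bs.map (· + (u.length : Int))) = pvG v bs := by
  unfold pvG
  rw [← List.map_tail, List.zip_map, List.map_map]
  apply List.map_congr_left
  intro pq hpq
  obtain ⟨hp, hq⟩ : pq.1 ∈ bs ∧ pq.2 ∈ bs.tail := by
    obtain ⟨x, y⟩ := pq
    exact List.of_mem_zip hpq
  have hp0 : 0 ≤ pq.1 := h0 _ hp
  have hq1 : 1 ≤ pq.2 := h1 _ hq
  have hq0 : 0 ≤ pq.2 := by omega
  simp only [Prod.map, Function.comp_apply]
  refine Prod.ext ?_ (Prod.ext ?_ ?_)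
  · simp only []
    rw [add_comm pq.1, pyGetD_append_right u v pq.1 hp0]
  · simp only []
    have : pq.2 + (u.length : Int) - 1 = (u.length : Int) + (pq.2 - 1) := by ring
    rw [this, pyGetD_append_right u v (pq.2 - 1) (by omega)]
  · simp only []
    rw [add_comm pq.1, add_comm pq.2, slice_append_right u v pq.1 pq.2 hp0 hq0]

-- every element of pvBounds is nonnegative; every tail element is ≥ 1
lemma pvBounds_nonneg (xs : List Int) : ∀ b ∈ pvBounds xs, 0 ≤ b := by
  intro b hb
  unfold pvBounds at hb
  simp only [List.mem_append, List.mem_filter, List.mem_cons,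
    List.not_mem_nil, or_false] at hb
  rcases hb with (hb | hb) | hb
  · omega
  · have := (PySem.List.mem_pyRange_one).mp hb.1; omega
  · subst hb; positivity

lemma pvBounds_tail_pos (xs : List Int) (hne : xs ≠ []) : ∀ b ∈ (pvBounds xs).tail, 1 ≤ b := by
  intro b hb
  have hb' : b ∈ (List.filter (pvCut xs) (PySem.List.pyRange 1 (xs.length : Int) 1))
      ++ [(xs.length : Int)] := by
    simpa [pvBounds] using hb
  rw [List.mem_append] at hb'
  rcases hb' with hb' | hb'
  · have := (PySem.List.mem_pyRange_one).mp (List.mem_filter.mp hb').1; omega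
  · have : 0 < xs.length := List.length_pos_of_ne_nil hne
    simp only [List.mem_singleton] at hb'
    omega

lemma pyGetD_nat (xs : List Int) (k : Nat) (hk : k < xs.length) :
    PySem.List.pyGetD xs ((k : Nat) : Int) 0 = xs[k] := by
  rw [PySem.List.pyGetD_natCast]
  exact List.getD_eq_getElem _ _ hk

-- no cut index falls inside the first run
lemma filter_run_nil (a : Int) (t : List Int) :
    List.filter (pvCut (a :: t))
        (PySem.List.pyRange 1 (((a :: (pvTakeRun a t).1).length : Nat) : Int) 1) = [] := by
  rw [List.filter_eq_nil_iff]
  intro i hi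
  rw [PySem.List.mem_pyRange_one] at hi
  have hxs : (a :: t) = (a :: (pvTakeRun a t).1) ++ (pvTakeRun a t).2 := by
    rw [List.cons_append]
    congr 1
    exact pvTakeRun_decomp a t
  set run := a :: (pvTakeRun a t).1 with hrun
  have hL : 0 < run.length := by simp [hrun]
  have hk : i = ((i.toNat : Nat) : Int) := by omega
  set k := i.toNat with hkdef
  have hk1 : 1 ≤ k := by omega
  have hkL : k < run.length := by omega
  have hlen : run.length ≤ (a :: t).length := by rw [hxs]; simp
  have e1 : PySem.List.pyGetD (a :: t) i 0 = run[k] := by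
    rw [hk, pyGetD_nat _ _ (by omega)]
    exact (List.getElem_of_eq hxs _).trans (List.getElem_append_left (by omega))
  have e2 : PySem.List.pyGetD (a :: t) (i - 1) 0 = run[k - 1] := by
    have : i - 1 = (((k - 1 : Nat)) : Int) := by omega
    rw [this, pyGetD_nat _ _ (by omega)]
    exact (List.getElem_of_eq hxs _).trans (List.getElem_append_left (by omega))
  have hchain := pvTakeRun_chain t a (k - 1) (by rw [← hrun]; omega)
  unfold pvCut
  rw [e1, e2]
  simp only [decide_eq_true_eq, not_not]
  convert hchain using 2
  omega

-- the cut condition shifted past the first run is the cut condition of the rest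
lemma cut_shift (run rest : List Int) (b : Int) (hb : 1 ≤ b) :
    pvCut (run ++ rest) (b + (run.length : Int)) = pvCut rest b := by
  unfold pvCut
  have h1 : b + (run.length : Int) = (run.length : Int) + b := by ring
  have h2 : b + (run.length : Int) - 1 = (run.length : Int) + (b - 1) := by ring
  rw [h2, h1, pyGetD_append_right run rest b (by omega) 0,
      pyGetD_append_right run rest (b - 1) (by omega) 0]

lemma pvBounds_shape (a : Int) (t : List Int) (y : Int) (ys : List Int)
    (hrest : (pvTakeRun a t).2 = y :: ys) :
    pvBounds (a :: t)
      = 0 :: (pvBounds (y :: ys)).map (· + (((a :: (pvTakeRun a t).1).length : Nat) : Int)) := by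
  have hxs : (a :: t) = (a :: (pvTakeRun a t).1) ++ (y :: ys) := by
    rw [List.cons_append]
    exact congrArg (List.cons a) ((pvTakeRun_decomp a t).trans (by rw [hrest]))
  set run := a :: (pvTakeRun a t).1 with hrun
  set L : Nat := run.length with hLdef
  have hlen : (a :: t).length = L + (y :: ys).length := by rw [hxs]; simp [hLdef]
  have hrunne : run ≠ [] := by rw [hrun]; exact List.cons_ne_nil a _
  have hL1 : 1 ≤ L := by rw [hLdef]; exact List.length_pos_of_ne_nil hrunne
  have hLn : (L : Int) < ((a :: t).length : Int) := by
    have : 0 < (y :: ys).length := by simp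
    omega
  -- split the index range at L
  rw [pvBounds, PySem.List.pyRange_one_append 1 (L : Int) ((a :: t).length : Int)
        (by omega) (by omega), List.filter_append, filter_run_nil a t]
  rw [PySem.List.pyRange_one_cons hLn]
  -- the cut at L itself fires
  have hcutL : pvCut (a :: t) (L : Int) = true := by
    have e1 : PySem.List.pyGetD (a :: t) (L : Int) 0 = y := by
      rw [hxs]
      have : (L : Int) = (run.length : Int) + 0 := by omega
      rw [this, pyGetD_append_right run _ 0 le_rfl 0]
      exact PySem.List.pyGetD_zero_cons y ys 0
    have e2 : PySem.List.pyGetD (a :: t) ((L : Int) - 1) 0 = run.getLast (by simp [hrun]) := by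
      have : (L : Int) - 1 = (((L - 1 : Nat)) : Int) := by omega
      rw [this, pyGetD_nat _ _ (by omega), List.getLast_eq_getElem]
      exact (List.getElem_of_eq hxs _).trans (List.getElem_append_left (by omega))
    unfold pvCut
    rw [e1, e2]
    simp only [decide_eq_true_eq]
    exact pvTakeRun_break t a y ys hrest
  rw [List.filter_cons_of_pos hcutL]
  -- the remaining range is the rest's range shifted by L
  have hr2 : PySem.List.pyRange ((L : Int) + 1) ((a :: t).length : Int) 1
      = (PySem.List.pyRange 1 (((y :: ys).length : Nat) : Int) 1).map (· + (L : Int)) := by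
    rw [PySem.List.pyRange_one, PySem.List.pyRange_one, List.map_map]
    have hcnt : (((a :: t).length : Int) - ((L : Int) + 1)).toNat
        = ((((y :: ys).length : Nat) : Int) - 1).toNat := by omega
    rw [hcnt]
    apply List.map_congr_left
    intro k _
    simp only [Function.comp_apply]
    ring
  rw [hr2, List.filter_map]
  have hfc : (pvCut (a :: t) ∘ (· + (L : Int)))
      = fun b => pvCut (a :: t) (b + (L : Int)) := rfl
  have hshift : List.filter (pvCut (a :: t) ∘ (· + (L : Int)))
        (PySem.List.pyRange 1 (((y :: ys).length : Nat) : Int) 1)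
      = List.filter (pvCut (y :: ys))
        (PySem.List.pyRange 1 (((y :: ys).length : Nat) : Int) 1) := by
    apply List.filter_congr
    intro b hb
    rw [PySem.List.mem_pyRange_one] at hb
    rw [hfc]
    simp only []
    rw [hxs]
    exact cut_shift run (y :: ys) b (by omega)
  rw [hshift]
  -- assemble both sides
  rw [pvBounds]
  simp only [List.map_append, List.map_cons, List.map_nil, List.nil_append,
    List.cons_append, zero_add]
  have hend : ((((y :: ys).length : Nat) : Int) + (L : Int)) = (((a :: t).length : Nat) : Int) := by
    omega
  rw [hend]

lemma pvBounds_shape_nil (a : Int) (t : List Int) (hrest : (pvTakeRun a t).2 = []) :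
    pvBounds (a :: t) = [0, ((a :: t).length : Int)] := by
  have ht : t = (pvTakeRun a t).1 := by
    have h := pvTakeRun_decomp a t
    rw [hrest] at h
    simpa using h
  have hlen : (((a :: t).length : Nat) : Int) = (((a :: (pvTakeRun a t).1).length : Nat) : Int) := by
    rw [← ht]
  rw [pvBounds]
  have hfilt : List.filter (pvCut (a :: t))
      (PySem.List.pyRange 1 (((a :: t).length : Nat) : Int) 1) = [] := by
    rw [hlen]
    exact filter_run_nil a t
  rw [hfilt]
  rfl

lemma pvG_cons (xs : List Int) (x b : Int) (t' : List Int) :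
    pvG xs (x :: b :: t')
      = (PySem.List.pyGetD xs x 0, PySem.List.pyGetD xs (b - 1) 0,
         PySem.List.slice xs (some x) (some b)) :: pvG xs (b :: t') := by
  simp [pvG]

lemma pvG_bounds_eq_runs (xs : List Int) (hne : xs ≠ []) :
    pvG xs (pvBounds xs) = (pvRunsOf xs).map pvFmt := by
  revert hne
  induction xs using pvRunsOf.induct with
  | case1 => intro h; exact absurd rfl h
  | case2 a t ih =>
    intro _
    cases hrest : (pvTakeRun a t).2 with
    | nil =>
      have ht : t = (pvTakeRun a t).1 := by
        have h := pvTakeRun_decomp a t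
        rw [hrest] at h
        simpa using h
      rw [pvBounds_shape_nil a t hrest, pvRunsOf, hrest]
      simp only [pvRunsOf, List.map_cons, List.map_nil]
      rw [← ht]
      have hn : 0 < (a :: t).length := by simp
      simp only [pvG, List.zip_cons_cons, List.tail_cons, List.zip_nil_right,
        List.map_cons, List.map_nil, List.zip_cons_cons]
      congr 1
      unfold pvFmt
      refine Prod.ext rfl (Prod.ext ?_ ?_)
      · simp only []
        have h1 : (((a :: t).length : Nat) : Int) - 1 = (((((a :: t).length - 1 : Nat))) : Int) := by
          omega
        rw [h1, pyGetD_nat _ _ (by omega), PySem.List.pyGetD_neg_one (a :: t) 0 (by simp),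
          List.getLast_eq_getElem]
      · simp only [PySem.List.slice_zero_start, PySem.List.slice_to_natCast]
        exact List.take_length
    | cons y ys =>
      rw [pvBounds_shape a t y ys hrest]
      rw [pvRunsOf, hrest]
      rw [hrest] at ih
      have hxs : (a :: t) = (a :: (pvTakeRun a t).1) ++ (y :: ys) := by
        rw [List.cons_append]
        exact congrArg (List.cons a) ((pvTakeRun_decomp a t).trans (by rw [hrest]))
      set run := a :: (pvTakeRun a t).1 with hrun
      set L : Nat := run.length with hLdef
      have hL1 : 1 ≤ L := by rw [hLdef, hrun]; simp
      -- expose the leading 0 of the rest's bounds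
      have hB : pvBounds (y :: ys)
          = 0 :: (List.filter (pvCut (y :: ys))
              (PySem.List.pyRange 1 (((y :: ys).length : Nat) : Int) 1) ++ [(((y :: ys).length : Nat) : Int)]) := by
        rw [pvBounds]; rfl
      have hmap : (pvBounds (y :: ys)).map (· + (L : Int))
          = (L : Int) :: ((List.filter (pvCut (y :: ys))
              (PySem.List.pyRange 1 (((y :: ys).length : Nat) : Int) 1) ++ [(((y :: ys).length : Nat) : Int)]).map (· + (L : Int))) := by
        rw [hB]
        simp
      rw [hmap, pvG_cons]
      have hback : (L : Int) :: ((List.filter (pvCut (y :: ys))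
              (PySem.List.pyRange 1 (((y :: ys).length : Nat) : Int) 1) ++ [(((y :: ys).length : Nat) : Int)]).map (· + (L : Int)))
          = (pvBounds (y :: ys)).map (· + (L : Int)) := hmap.symm
      rw [hback]
      have hshift : pvG (a :: t) ((pvBounds (y :: ys)).map (· + (L : Int)))
          = pvG (y :: ys) (pvBounds (y :: ys)) := by
        rw [hxs]
        exact pvG_shift run (y :: ys) (pvBounds (y :: ys))
          (pvBounds_nonneg (y :: ys)) (pvBounds_tail_pos (y :: ys) (by simp))
      rw [hshift, ih (by simp)]
      simp only [List.map_cons]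
      congr 1
      -- the head tuple is the formatted first run
      unfold pvFmt
      refine Prod.ext ?_ (Prod.ext ?_ ?_)
      · simp only []
        rw [PySem.List.pyGetD_zero_cons, hrun, PySem.List.pyGetD_zero_cons]
      · simp only []
        have h1 : (L : Int) - 1 = (((L - 1 : Nat)) : Int) := by omega
        have hlen : L ≤ (a :: t).length := by rw [hxs, hLdef]; simp
        rw [h1, pyGetD_nat _ _ (by omega),
          PySem.List.pyGetD_neg_one run 0 (by rw [hrun]; exact List.cons_ne_nil a _),
          List.getLast_eq_getElem]
        exact (List.getElem_of_eq hxs _).trans (List.getElem_append_left (by omega))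
      · simp only [PySem.List.slice_zero_start, PySem.List.slice_to_natCast]
        rw [hxs, hLdef]
        exact List.take_left

-- ===== VERDICT (by name: the statement is the Claim_ definition above) =====
theorem group_into_gaps_spec : Claim_equal_group_into_gaps := by
  intro xs _
  unfold Spec_group_into_gaps
  cases xs with
  | nil => rfl
  | cons a t =>
    rw [a_eq_runs, alt_eq_G _ (by simp), pvG_bounds_eq_runs _ (by simp)]
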